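-- pv_equiv track=rewrite | github.com/Kenjicci/Search-Algorithms | DFS/dfs_number.py | dfs
-- ===== SOURCE A (Python) =====
-- def get_moves(number):
--     return [number + 1, number+ 2]
--
-- def dfs(number, goal, path):
--     if number == goal:
--         return path
--
--     moves = get_moves(number)
--
--     result = dfs(moves[0], goal, path + [moves[0]])
--     if result:
--         return result
--
--     return dfs(moves[1], goal, path + [moves[1]])
-- ===== SOURCE B (Python) =====
-- def dfs(number, goal, path):
--     return path + list(range(number + 1, goal + 1))
-- ===== Notes on version B (the rewrite author's own statement) =====
-- stated objective: faster
-- what changed: Replace the recursive two-branch DFS (which rebuilds path + [move] at every level, O(n^2) total) with a direct closed form: the answer is always path extended by the consecutive integers number+1..goal.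
import Mathlib
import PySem

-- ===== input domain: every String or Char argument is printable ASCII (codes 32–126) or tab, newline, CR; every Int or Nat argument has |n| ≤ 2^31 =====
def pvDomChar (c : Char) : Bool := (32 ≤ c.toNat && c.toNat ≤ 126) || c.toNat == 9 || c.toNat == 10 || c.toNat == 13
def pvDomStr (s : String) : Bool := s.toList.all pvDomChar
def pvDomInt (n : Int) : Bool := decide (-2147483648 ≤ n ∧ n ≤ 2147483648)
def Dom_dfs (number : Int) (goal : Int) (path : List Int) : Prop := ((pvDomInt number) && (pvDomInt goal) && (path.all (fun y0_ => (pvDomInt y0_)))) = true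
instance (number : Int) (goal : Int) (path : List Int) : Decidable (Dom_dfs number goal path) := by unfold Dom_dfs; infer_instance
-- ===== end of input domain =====

-- B replaces A's recursive two-branch search by the closed form path ++ [number+1 .. goal]: asymptotically faster, same value wherever A terminates.

-- ===== PORT A =====
-- get_moves(number) = [number+1, number+2]
def get_moves (number : Int) : List Int := [number + 1, number + 2]

-- A's recursion does not terminate when number > goal (Python: RecursionError); the fuel
-- parameter only makes the same computation total — Pre_dfs guarantees it suffices.
def dfsF : Nat → Int → Int → List Int → List Int
  | 0, _, _, _ => []
  | fuel + 1, number, goal, path =>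
    if number == goal then path
    else
      let moves := get_moves number
      let result := dfsF fuel (moves[0]!) goal (path ++ [moves[0]!])
      if result ≠ [] then result
      else dfsF fuel (moves[1]!) goal (path ++ [moves[1]!])

def dfs (number : Int) (goal : Int) (path : List Int) : List Int :=
  dfsF ((goal - number).toNat + 1) number goal path

-- ===== PORT B =====
def dfs_alt (number : Int) (goal : Int) (path : List Int) : List Int :=
  path ++ PySem.List.pyRange (number + 1) (goal + 1) 1

-- ===== PRECONDITION & SPEC =====
-- Pre_ excludes number > goal, where Python's A recurses forever and raises RecursionError.
def Pre_dfs (number : Int) (goal : Int) (path : List Int) : Prop := number ≤ goal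
instance (number : Int) (goal : Int) (path : List Int) : Decidable (Pre_dfs number goal path) := by unfold Pre_dfs; infer_instance
def pvWitness_dfs : Int × Int × List Int := (2, 5, [2])

def Spec_dfs (number : Int) (goal : Int) (path : List Int) (out : List Int) : Prop := out = dfs_alt number goal path
instance (number : Int) (goal : Int) (path : List Int) (out : List Int) : Decidable (Spec_dfs number goal path out) := by unfold Spec_dfs; infer_instance

-- ===== CLAIM (what is proved, stated in full; the proofs are below) =====
def Claim_equal_dfs : Prop := ∀ (number : Int) (goal : Int) (path : List Int), Dom_dfs number goal path → Pre_dfs number goal path → Spec_dfs number goal path (dfs number goal path)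
-- ===== LEMMAS AND PROOFS =====
-- With enough fuel and number ≤ goal, A's recursion yields path ++ [number+1 .. goal].
theorem dfsF_eq (fuel : Nat) (number goal : Int) (path : List Int)
    (hle : number ≤ goal) (hf : (goal - number).toNat < fuel) :
    dfsF fuel number goal path = path ++ PySem.List.pyRange (number + 1) (goal + 1) 1 := by
  induction fuel generalizing number path with
  | zero => omega
  | succ fuel ih =>
    simp only [dfsF, get_moves]
    by_cases h : number = goal
    · subst h
      simp [PySem.List.pyRange_one_eq_nil (by omega : goal + 1 ≤ goal + 1)]
    · have hlt : number < goal := lt_of_le_of_ne hle h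
      have hres : dfsF fuel (number + 1) goal (path ++ [number + 1]) =
          (path ++ [number + 1]) ++ PySem.List.pyRange (number + 1 + 1) (goal + 1) 1 :=
        ih (number + 1) (path ++ [number + 1]) (by omega) (by omega)
      have hne : (path ++ [number + 1]) ++ PySem.List.pyRange (number + 1 + 1) (goal + 1) 1 ≠ [] := by
        simp
      simp only [h, beq_iff_eq, if_neg h, List.getElem!_cons_zero,
        List.getElem!_cons_succ, hres, if_pos hne, ne_eq, hne, not_false_eq_true, ite_true]
      rw [PySem.List.pyRange_one_cons (by omega : number + 1 < goal + 1)]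
      simp

-- ===== VERDICT (by name: the statement is the Claim_ definition above) =====
theorem dfs_spec : Claim_equal_dfs := by
  intro number goal path _ hpre
  unfold Spec_dfs dfs dfs_alt
  exact dfsF_eq _ number goal path hpre (by omega)
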